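-- pv_equiv track=rewrite | github.com/BattleForged/codejam | 2022_0q/a.py | outRow
-- ===== SOURCE A (Python) =====
-- def outRow (c, pattern):
--     out = ['.'] * (c * 2 + 1)
--     for i in range(c * 2 + 1):
--         if (i % 2 == 0 and pattern == 0):
--             out[i] = '+'
--         if (i % 2 == 1 and pattern == 0):
--             out[i] = '-'
--         if (i % 2 == 0 and pattern == 1):
--             out[i] = '|'
--         if (i % 2 == 1 and pattern == 1):
--             out[i] = '.'
--     return out
-- ===== SOURCE B (Python) =====
-- def outRow(c, pattern):
--     pair = {0: ['+', '-'], 1: ['|', '.']}.get(pattern, ['.', '.'])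
--     return (pair * (c + 1))[:c * 2 + 1]
-- ===== Notes on version B (the rewrite author's own statement) =====
-- stated objective: simpler
-- what changed: B picks the two-symbol pair once with a dict lookup keyed by pattern (defaulting to dots) and builds the row by repeating the pair and truncating to length 2c+1, replacing A's per-index parity tests and in-place assignments.
import Mathlib
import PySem

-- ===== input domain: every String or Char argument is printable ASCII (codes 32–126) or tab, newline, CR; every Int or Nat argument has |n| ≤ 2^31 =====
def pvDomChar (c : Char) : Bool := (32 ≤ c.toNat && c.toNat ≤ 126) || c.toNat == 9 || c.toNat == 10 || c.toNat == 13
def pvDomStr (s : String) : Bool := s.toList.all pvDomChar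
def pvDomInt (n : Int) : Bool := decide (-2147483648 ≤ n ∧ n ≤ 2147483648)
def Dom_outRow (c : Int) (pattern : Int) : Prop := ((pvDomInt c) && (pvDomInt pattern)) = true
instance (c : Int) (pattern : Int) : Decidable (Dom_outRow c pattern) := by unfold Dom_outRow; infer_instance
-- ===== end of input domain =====

-- B selects the pair of symbols once (a dict lookup) and builds the row by tiling and truncating,
-- instead of A's per-index parity tests and in-place assignment; objective: simpler.

-- ===== PORT A =====
def outRow (c : Int) (pattern : Int) : List String :=
  (PySem.List.pyRange 0 (c * 2 + 1) 1).foldl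
    (fun out i =>
      -- out[i] = … : i is produced by range(c*2+1) over a list of that length, so the
      -- assignment is in range and List.set at i.toNat is exact
      let out := if PySem.Int.mod i 2 = 0 ∧ pattern = 0 then out.set i.toNat "+" else out
      let out := if PySem.Int.mod i 2 = 1 ∧ pattern = 0 then out.set i.toNat "-" else out
      let out := if PySem.Int.mod i 2 = 0 ∧ pattern = 1 then out.set i.toNat "|" else out
      let out := if PySem.Int.mod i 2 = 1 ∧ pattern = 1 then out.set i.toNat "." else out
      out)
    (PySem.List.pyRepeat ["."] (c * 2 + 1))

-- ===== PORT B =====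
def outRow_alt (c : Int) (pattern : Int) : List String :=
  let pair := (PySem.Dict.ofList [((0 : Int), ["+", "-"]), ((1 : Int), ["|", "."])]).getD pattern [".", "."]
  PySem.List.slice (PySem.List.pyRepeat pair (c + 1)) none (some (c * 2 + 1))

-- ===== PRECONDITION & SPEC =====
def Spec_outRow (c : Int) (pattern : Int) (out : List String) : Prop := out = outRow_alt c pattern
instance (c : Int) (pattern : Int) (out : List String) : Decidable (Spec_outRow c pattern out) := by unfold Spec_outRow; infer_instance

-- ===== CLAIM (what is proved, stated in full; the proofs are below) =====
def Claim_equal_outRow : Prop := ∀ (c : Int) (pattern : Int), Dom_outRow c pattern → Spec_outRow c pattern (outRow c pattern)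

-- ===== LEMMAS AND PROOFS =====

-- Python's i % 2 (floor mod) agrees with Int.emod for the positive divisor 2
theorem pv_mod_eq (i : Int) : PySem.Int.mod i 2 = i % 2 := by
  simp [PySem.Int.mod, Int.fmod_eq_emod]

theorem pv_mod2 (i : Int) : PySem.Int.mod i 2 = 0 ∨ PySem.Int.mod i 2 = 1 := by
  rw [pv_mod_eq]; omega

theorem pv_set_append_cons {α : Type} (l1 : List α) (a : α) (l2 : List α) (x : α)
    (k : ℕ) (hk : k = l1.length) : (l1 ++ a :: l2).set k x = l1 ++ x :: l2 := by
  subst hk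
  induction l1 with
  | nil => simp
  | cons b l ih => simp [ih]

-- A's loop: successively setting indices 0 … n-1 of a length-m list to g(i)
theorem pv_fill (g : Int → String) (d : String) :
    ∀ (n m : ℕ), n ≤ m →
      (PySem.List.pyRange 0 (n : Int) 1).foldl (fun o i => o.set i.toNat (g i)) (List.replicate m d)
        = (List.range n).map (fun k : ℕ => g (k : Int)) ++ List.replicate (m - n) d := by
  intro n
  induction n with
  | zero =>
    intro m _
    rw [PySem.List.pyRange_one_eq_nil (by omega)]
    simp
  | succ n ih =>
    intro m hm
    have hcast : ((n + 1 : ℕ) : Int) = (n : Int) + 1 := by push_cast; ring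
    rw [hcast, PySem.List.pyRange_one_succ_right (by positivity), List.foldl_append]
    simp only [List.foldl_cons, List.foldl_nil]
    rw [ih m (by omega)]
    have h1 : List.replicate (m - n) d = d :: List.replicate (m - (n + 1)) d := by
      rw [← List.replicate_succ]; congr 1; omega
    rw [h1, pv_set_append_cons _ _ _ _ _ (by simp [Int.toNat_natCast])]
    rw [List.range_succ, List.map_append]
    simp

theorem pv_A_loop (n : ℕ) (g : Int → String) (d : String) :
    (PySem.List.pyRange 0 (n : Int) 1).foldl (fun o i => o.set i.toNat (g i)) (List.replicate n d)
      = (List.range n).map (fun k : ℕ => g (k : Int)) := by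
  simpa using pv_fill g d n n le_rfl

-- B's tiling: pair * (k) flattened is the alternating row of length 2k
theorem pv_flat_rep (x y : String) :
    ∀ k : ℕ, (List.replicate k [x, y]).flatten
      = (List.range (2 * k)).map (fun i => if i % 2 = 0 then x else y) := by
  intro k
  induction k with
  | zero => simp
  | succ k ih =>
    rw [List.replicate_succ, List.flatten_cons, ih]
    have h2 : 2 * (k + 1) = 2 + 2 * k := by ring
    rw [h2, List.range_add, List.map_append, List.map_map]
    have htail : List.map ((fun i => if i % 2 = 0 then x else y) ∘ fun z => 2 + z) (List.range (2 * k))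
        = List.map (fun i => if i % 2 = 0 then x else y) (List.range (2 * k)) := by
      refine List.map_congr_left (fun i _ => ?_)
      simp only [Function.comp]
      have h3 : (2 + i) % 2 = i % 2 := by omega
      rw [h3]
    rw [htail]
    norm_num [List.range_succ]

theorem pv_B_tile (c : Int) (hc : 0 ≤ c) (x y : String) :
    PySem.List.slice (PySem.List.pyRepeat [x, y] (c + 1)) none (some (c * 2 + 1))
      = (List.range (c * 2 + 1).toNat).map (fun i => if i % 2 = 0 then x else y) := by
  rw [PySem.List.slice_to _ (by omega : (0 : Int) ≤ c * 2 + 1)]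
  simp only [PySem.List.pyRepeat]
  rw [pv_flat_rep x y]
  have hmin : min (c * 2 + 1).toNat (2 * (c + 1).toNat) = (c * 2 + 1).toNat := by omega
  rw [← List.map_take, List.take_range, hmin]

theorem pv_map_g (x y : String) (n : ℕ) :
    (List.range n).map (fun k : ℕ => if PySem.Int.mod (k : Int) 2 = 0 then x else y)
      = (List.range n).map (fun i => if i % 2 = 0 then x else y) := by
  refine List.map_congr_left (fun i _ => ?_)
  rw [pv_mod_eq]
  rcases Nat.mod_two_eq_zero_or_one i with h2 | h2 <;>
    · have : ((i : Int)) % 2 = ((i % 2 : ℕ) : Int) := by omega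
      simp [this, h2]

-- glue: A's set-loop equals B's tiled-and-truncated row (c ≥ 0)
theorem pv_glue (c : Int) (hc : 0 ≤ c) (x y : String) :
    (PySem.List.pyRange 0 (c * 2 + 1) 1).foldl
        (fun o i => o.set i.toNat (if PySem.Int.mod i 2 = 0 then x else y))
        (List.replicate (c * 2 + 1).toNat ".")
      = PySem.List.slice (PySem.List.pyRepeat [x, y] (c + 1)) none (some (c * 2 + 1)) := by
  rw [pv_B_tile c hc x y]
  obtain ⟨n, hn⟩ : ∃ n : ℕ, c * 2 + 1 = (n : Int) :=
    ⟨(c * 2 + 1).toNat, (Int.toNat_of_nonneg (by omega)).symm⟩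
  rw [hn]
  simp only [Int.toNat_natCast]
  rw [pv_A_loop n (fun i => if PySem.Int.mod i 2 = 0 then x else y) "."]
  exact pv_map_g x y n

-- the dict lookup, evaluated in the three cases
theorem pv_pair0 : (PySem.Dict.ofList [((0 : Int), ["+", "-"]), ((1 : Int), ["|", "."])]).getD 0 [".", "."] = ["+", "-"] := by
  decide

theorem pv_pair1 : (PySem.Dict.ofList [((0 : Int), ["+", "-"]), ((1 : Int), ["|", "."])]).getD 1 [".", "."] = ["|", "."] := by
  decide

theorem pv_pair_other (p : Int) (hp0 : ¬ p = 0) (hp1 : ¬ p = 1) :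
    (PySem.Dict.ofList [((0 : Int), ["+", "-"]), ((1 : Int), ["|", "."])]).getD p [".", "."] = [".", "."] := by
  have e : PySem.Dict.ofList [((0 : Int), ["+", "-"]), ((1 : Int), ["|", "."])]
      = PySem.Dict.mk [((0 : Int), ["+", "-"]), ((1 : Int), ["|", "."])] := by decide
  rw [e]
  have h0 : ((0 : Int) == p) = false := beq_eq_false_iff_ne.mpr (fun h => hp0 h.symm)
  have h1 : ((1 : Int) == p) = false := beq_eq_false_iff_ne.mpr (fun h => hp1 h.symm)
  simp [PySem.Dict.getD, h0, h1, PySem.Dict.get?]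

theorem pv_foldl_keep (l : List Int) (init : List String) :
    l.foldl (fun o _ => o) init = init := by
  induction l generalizing init <;> simp [*]

-- ===== VERDICT (by name: the statement is the Claim_ definition above) =====
theorem outRow_spec : Claim_equal_outRow := by
  intro c pattern _
  unfold Spec_outRow
  by_cases hc : 0 ≤ c
  · by_cases hp0 : pattern = 0
    · subst hp0
      simp only [outRow, outRow_alt, pv_pair0, PySem.List.pyRepeat_singleton]
      refine Eq.trans ?_ (pv_glue c hc "+" "-")
      refine PySem.List.foldl_congr_mem _ _ _ _ ?_
      intro o i _
      rcases pv_mod2 i with h | h <;> rw [pv_mod_eq] at h <;> simp only [pv_mod_eq, h] <;> norm_num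
    · by_cases hp1 : pattern = 1
      · subst hp1
        simp only [outRow, outRow_alt, pv_pair1, PySem.List.pyRepeat_singleton]
        refine Eq.trans ?_ (pv_glue c hc "|" ".")
        refine PySem.List.foldl_congr_mem _ _ _ _ ?_
        intro o i _
        rcases pv_mod2 i with h | h <;> rw [pv_mod_eq] at h <;> simp only [pv_mod_eq, h] <;> norm_num
      · simp only [outRow, outRow_alt, pv_pair_other pattern hp0 hp1, PySem.List.pyRepeat_singleton]
        refine Eq.trans (b := List.replicate (c * 2 + 1).toNat ".") ?_ ?_
        · refine Eq.trans (b := (PySem.List.pyRange 0 (c * 2 + 1) 1).foldl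
              (fun (o : List String) (_ : Int) => o) (List.replicate (c * 2 + 1).toNat ".")) ?_ ?_
          · refine PySem.List.foldl_congr_mem _ _ _ _ ?_
            intro o i _
            simp [hp0, hp1]
          · exact pv_foldl_keep _ _
        · rw [pv_B_tile c hc "." "."]
          simp
  · have h1 : c * 2 + 1 ≤ 0 := by omega
    simp only [outRow, outRow_alt]
    rw [PySem.List.pyRange_one_eq_nil (by omega)]
    simp only [List.foldl_nil]
    have hz : (c * 2 + 1).toNat = 0 := by omega
    have hz2 : (c + 1).toNat = 0 := by omega
    simp [PySem.List.pyRepeat, hz, hz2, PySem.List.slice]
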